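-- pv_equiv track=rewrite | github.com/nlarralde13/project-shardbound | test_api.py | compute_dist_to_ocean
-- ===== SOURCE A (Python) =====
-- from typing import Dict, Any, List, Tuple, Optional, Set
-- from collections import deque
--
-- def compute_dist_to_ocean(grid: List[List[str]]) -> List[List[int]]:
--     """Multi-source BFS distance (4-neigh) from ocean tiles. -1 = unreachable."""
--     H = len(grid); W = len(grid[0]) if H else 0
--     dist = [[-1]*W for _ in range(H)]
--     q = deque()
--     for y in range(H):
--         for x in range(W):
--             if grid[y][x] == "ocean":
--                 dist[y][x] = 0
--                 q.append((x, y))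
--     DIRS = [(1,0),(-1,0),(0,1),(0,-1)]
--     while q:
--         x, y = q.popleft()
--         for dx, dy in DIRS:
--             nx, ny = x+dx, y+dy
--             if 0 <= nx < W and 0 <= ny < H and dist[ny][nx] == -1:
--                 dist[ny][nx] = dist[y][x] + 1
--                 q.append((nx, ny))
--     return dist
-- ===== SOURCE B (Python) =====
-- def compute_dist_to_ocean(grid):
--     """Closed form: with no obstacles, BFS distance from the ocean tiles is the
--     Manhattan (L1) distance to the nearest ocean tile; -1 when there is none."""
--     H = len(grid); W = len(grid[0]) if H else 0
--     oceans = [(x, y) for y in range(H) for x in range(W) if grid[y][x] == "ocean"]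
--     return [[min((abs(x - ox) + abs(y - oy) for ox, oy in oceans), default=-1)
--              for x in range(W)] for y in range(H)]
-- ===== Notes on version B (the rewrite author's own statement) =====
-- stated objective: simpler
-- what changed: Replaces the multi-source BFS with a queue and a mutable distance grid by a direct closed form: since every cell is traversable, the BFS distance equals the Manhattan distance to the nearest ocean tile, so B collects the ocean coordinates once and fills each cell with min(|x-ox|+|y-oy|) (default -1).
import Mathlib
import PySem

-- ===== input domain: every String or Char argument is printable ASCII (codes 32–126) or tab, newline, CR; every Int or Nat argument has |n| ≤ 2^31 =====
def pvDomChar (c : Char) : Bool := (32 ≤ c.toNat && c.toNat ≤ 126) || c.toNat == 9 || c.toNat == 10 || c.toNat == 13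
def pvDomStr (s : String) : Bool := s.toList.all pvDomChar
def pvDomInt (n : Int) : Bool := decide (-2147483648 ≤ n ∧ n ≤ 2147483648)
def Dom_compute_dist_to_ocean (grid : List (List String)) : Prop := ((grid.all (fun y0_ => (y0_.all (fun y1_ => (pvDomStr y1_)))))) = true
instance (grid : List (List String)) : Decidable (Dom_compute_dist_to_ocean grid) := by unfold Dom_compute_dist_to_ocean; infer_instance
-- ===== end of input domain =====

-- B replaces the multi-source BFS (queue + mutable distance grid) by the closed form it
-- computes — the Manhattan distance to the nearest ocean tile, -1 when there is none.
-- ===== PORT A =====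
def strAt (g : List (List String)) (y x : Int) : String :=
  PySem.List.pyGetD (PySem.List.pyGetD g y []) x ""

def getC (d : List (List Int)) (y x : Int) : Int :=
  PySem.List.pyGetD (PySem.List.pyGetD d y []) x (-1)

def setC (d : List (List Int)) (y x : Int) (v : Int) : List (List Int) :=
  PySem.List.pySetD d y (PySem.List.pySetD (PySem.List.pyGetD d y []) x v)

def dirsA : List (Int × Int) := [(1,0),(-1,0),(0,1),(0,-1)]

-- body of the inner 'for dx, dy in DIRS' loop
def bfsRelax (W H x y : Int) (s : List (List Int) × List (Int × Int)) (d : Int × Int) :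
    List (List Int) × List (Int × Int) :=
  let nx := x + d.1
  let ny := y + d.2
  if 0 ≤ nx ∧ nx < W ∧ 0 ≤ ny ∧ ny < H ∧ getC s.1 ny nx = -1 then
    (setC s.1 ny nx (getC s.1 y x + 1), s.2 ++ [(nx, ny)])
  else s

-- the 'while q' loop; the fuel only makes the recursion structural (proved ample below)
def bfsLoop (W H : Int) : Nat → List (List Int) × List (Int × Int) → List (List Int)
  | 0, s => s.1
  | Nat.succ fuel, s =>
    match s.2 with
    | [] => s.1
    | (x, y) :: qt => bfsLoop W H fuel (dirsA.foldl (bfsRelax W H x y) (s.1, qt))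

def compute_dist_to_ocean (grid : List (List String)) : List (List Int) :=
  let H : Int := grid.length
  let W : Int := if grid.length ≠ 0 then ((PySem.List.pyGetD grid 0 []).length : Int) else 0
  let dist0 : List (List Int) := (PySem.List.pyRange 0 H 1).map (fun _ => List.replicate W.toNat (-1))
  let init := (PySem.List.pyRange 0 H 1).foldl (fun s y =>
      (PySem.List.pyRange 0 W 1).foldl (fun s x =>
        if strAt grid y x == "ocean" then (setC s.1 y x 0, s.2 ++ [(x, y)]) else s) s)
    (dist0, ([] : List (Int × Int)))
  bfsLoop W H (6 * (H.toNat * W.toNat)) init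

-- ===== PORT B =====
-- the ocean-coordinate comprehension
def oceansOf (g : List (List String)) (W H : Int) : List (Int × Int) :=
  (PySem.List.pyRange 0 H 1).flatMap (fun y =>
    (PySem.List.pyRange 0 W 1).filterMap (fun x =>
      if strAt g y x == "ocean" then some (x, y) else none))

-- min(…, default=d)
def pymin (l : List Int) (d : Int) : Int := (PySem.List.min? l (fun v => v)).getD d

def compute_dist_to_ocean_alt (grid : List (List String)) : List (List Int) :=
  let H : Int := grid.length
  let W : Int := if grid.length ≠ 0 then ((PySem.List.pyGetD grid 0 []).length : Int) else 0
  let oc := oceansOf grid W H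
  (PySem.List.pyRange 0 H 1).map (fun y =>
    (PySem.List.pyRange 0 W 1).map (fun x =>
      pymin (oc.map (fun o => |x - o.1| + |y - o.2|)) (-1)))

-- ===== PRECONDITION & SPEC =====
-- Pre_ excludes exactly the grids on which the Python raises IndexError:
-- some row shorter than row 0 (both A and B index every row at each x < len(grid[0])).
def Pre_compute_dist_to_ocean (grid : List (List String)) : Prop :=
  ∀ row ∈ grid, (PySem.List.pyGetD grid 0 []).length ≤ row.length

instance (grid : List (List String)) : Decidable (Pre_compute_dist_to_ocean grid) := by
  unfold Pre_compute_dist_to_ocean; infer_instance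

def pvWitness_compute_dist_to_ocean : List (List String) :=
  [["land", "ocean"], ["land", "land"], ["rock", "land"]]

def Spec_compute_dist_to_ocean (grid : List (List String)) (out : List (List Int)) : Prop := out = compute_dist_to_ocean_alt grid
instance (grid : List (List String)) (out : List (List Int)) : Decidable (Spec_compute_dist_to_ocean grid out) := by unfold Spec_compute_dist_to_ocean; infer_instance

-- ===== CLAIM (what is proved, stated in full; the proofs are below) =====
def Claim_equal_compute_dist_to_ocean : Prop := ∀ (grid : List (List String)), Dom_compute_dist_to_ocean grid → Pre_compute_dist_to_ocean grid → Spec_compute_dist_to_ocean grid (compute_dist_to_ocean grid)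

-- ===== LEMMAS AND PROOFS =====
-- Proof plan: A's BFS is shown, by a queue invariant (BI/SI), to fill every in-bounds cell
-- with Dv, the minimum L1 distance to an ocean cell (-1 if none) — exactly what B computes.

-- in-bounds cells, p = (x, y)
def inb (W H : Int) (p : Int × Int) : Prop := 0 ≤ p.1 ∧ p.1 < W ∧ 0 ≤ p.2 ∧ p.2 < H

def padd (p d : Int × Int) : Int × Int := (p.1 + d.1, p.2 + d.2)

def Shape (W H : Int) (d : List (List Int)) : Prop :=
  d.length = H.toNat ∧ ∀ i, (h : i < d.length) → d[i].length = W.toNat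

def get2 (d : List (List Int)) (p : Int × Int) : Int := getC d p.2 p.1
def set2 (d : List (List Int)) (p : Int × Int) (v : Int) : List (List Int) := setC d p.2 p.1 v

def cnt (d : List (List Int)) : Nat := (d.map (fun r => r.count (-1))).sum

-- the value B writes at p
def Dv (g : List (List String)) (W H : Int) (p : Int × Int) : Int :=
  pymin ((oceansOf g W H).map (fun o => |p.1 - o.1| + |p.2 - o.2|)) (-1)

lemma get2_eq (d : List (List Int)) (p : Int × Int) (hx0 : 0 ≤ p.1) (hy0 : 0 ≤ p.2) :
    get2 d p = (d[p.2.toNat]?.getD [])[p.1.toNat]?.getD (-1) := by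
  unfold get2 getC
  rw [PySem.List.pyGetD_of_nonneg _ _ hy0, PySem.List.pyGetD_of_nonneg _ _ hx0,
    List.getD_eq_getElem?_getD, List.getD_eq_getElem?_getD]

lemma set2_eq (d : List (List Int)) (p : Int × Int) (hx0 : 0 ≤ p.1) (hy0 : 0 ≤ p.2) (v : Int) :
    set2 d p v = d.set p.2.toNat ((d[p.2.toNat]?.getD []).set p.1.toNat v) := by
  unfold set2 setC
  rw [PySem.List.pyGetD_of_nonneg _ _ hy0, PySem.List.pySetD_of_nonneg _ _ hx0,
    PySem.List.pySetD_of_nonneg _ _ hy0, List.getD_eq_getElem?_getD]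

lemma get2_eq_getElem (W H : Int) (d : List (List Int)) (p : Int × Int)
    (hp : inb W H p) (h2 : p.2.toNat < d.length) (h1 : p.1.toNat < d[p.2.toNat].length) :
    get2 d p = d[p.2.toNat][p.1.toNat] := by
  obtain ⟨hx0, hxW, hy0, hyH⟩ := hp
  rw [get2_eq d p hx0 hy0, List.getElem?_eq_getElem h2]
  simp [List.getElem?_eq_getElem h1]

lemma row_len (W H : Int) (d : List (List Int)) (hs : Shape W H d) (n : Nat)
    (hn : n < d.length) : (d[n]?.getD []).length = W.toNat := by
  rw [List.getElem?_eq_getElem hn]; exact hs.2 _ hn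

lemma shape_set2 (W H : Int) (d : List (List Int)) (p : Int × Int) (v : Int)
    (hs : Shape W H d) (hp : inb W H p) : Shape W H (set2 d p v) := by
  obtain ⟨hx0, hxW, hy0, hyH⟩ := hp
  rw [set2_eq d p hx0 hy0]
  obtain ⟨hl, hr⟩ := hs
  refine ⟨by simpa using hl, ?_⟩
  intro i hi
  have hi' : i < d.length := by simpa using hi
  rw [List.getElem_set]
  split
  · next heq =>
    subst heq
    rw [List.length_set, row_len W H d ⟨hl, hr⟩ _ hi']
  · exact hr _ hi'

lemma get2_set2_self (W H : Int) (d : List (List Int)) (p : Int × Int) (v : Int)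
    (hs : Shape W H d) (hp : inb W H p) : get2 (set2 d p v) p = v := by
  obtain ⟨hx0, hxW, hy0, hyH⟩ := hp
  have hy : p.2.toNat < d.length := by rw [hs.1]; omega
  have hx : p.1.toNat < (d[p.2.toNat]?.getD []).length := by
    rw [row_len W H d hs _ hy]; omega
  rw [get2_eq _ p hx0 hy0, set2_eq d p hx0 hy0,
    List.getElem?_set_self (by simpa using hy), Option.getD_some,
    List.getElem?_set_self (by simpa using hx), Option.getD_some]

lemma get2_set2_ne (W H : Int) (d : List (List Int)) (p q : Int × Int) (v : Int)
    (hs : Shape W H d) (hp : inb W H p) (hq : inb W H q) (hne : p ≠ q) :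
    get2 (set2 d p v) q = get2 d q := by
  obtain ⟨hx0, hxW, hy0, hyH⟩ := hp
  obtain ⟨hx0', hxW', hy0', hyH'⟩ := hq
  rw [get2_eq _ q hx0' hy0', get2_eq d q hx0' hy0', set2_eq d p hx0 hy0]
  by_cases hyy : p.2.toNat = q.2.toNat
  · have hy : p.2.toNat < d.length := by rw [hs.1]; omega
    have hxx : p.1.toNat ≠ q.1.toNat := by
      have : p.1 ≠ q.1 := fun h => hne (Prod.ext h (by omega))
      omega
    rw [← hyy, List.getElem?_set_self (by simpa using hy), Option.getD_some,
      List.getElem?_set_ne hxx]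
  · rw [List.getElem?_set_ne hyy]

lemma sum_set_nat (l : List Nat) (n : Nat) (a : Nat) (h : n < l.length) :
    (l.set n a).sum + l[n] = l.sum + a := by
  induction l generalizing n with
  | nil => simp at h
  | cons b t ih =>
    cases n with
    | zero => simp [List.set]; omega
    | succ m =>
      simp only [List.set, List.sum_cons, List.getElem_cons_succ]
      have := ih m (by simpa using h); omega

lemma cnt_set2 (W H : Int) (d : List (List Int)) (p : Int × Int) (v : Int)
    (hs : Shape W H d) (hp : inb W H p) (hold : get2 d p = -1) (hv : v ≠ -1) :
    cnt (set2 d p v) + 1 = cnt d := by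
  obtain ⟨hx0, hxW, hy0, hyH⟩ := hp
  have hy : p.2.toNat < d.length := by rw [hs.1]; omega
  have hx : p.1.toNat < (d[p.2.toNat]?.getD []).length := by
    rw [row_len W H d hs _ hy]; omega
  have hx' : p.1.toNat < d[p.2.toNat].length := by
    rwa [List.getElem?_eq_getElem hy, Option.getD_some] at hx
  have hrow : d[p.2.toNat]?.getD [] = d[p.2.toNat] := by
    rw [List.getElem?_eq_getElem hy, Option.getD_some]
  have holdE : d[p.2.toNat][p.1.toNat] = -1 := by
    rw [get2_eq d p hx0 hy0, hrow] at hold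
    rwa [List.getElem?_eq_getElem hx', Option.getD_some] at hold
  have hcount : (d[p.2.toNat].set p.1.toNat v).count (-1) + 1 = d[p.2.toNat].count (-1) := by
    rw [List.count_set hx']
    have hpos : 0 < d[p.2.toNat].count (-1) := by
      rw [List.count_pos_iff]; exact holdE ▸ List.getElem_mem hx'
    simp [holdE, hv]
    omega
  unfold cnt
  rw [set2_eq d p hx0 hy0, hrow, List.map_set]
  have := sum_set_nat (d.map (fun r => r.count (-1))) p.2.toNat
      ((d[p.2.toNat].set p.1.toNat v).count (-1)) (by simpa using hy)
  rw [List.getElem_map] at this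
  omega

lemma cnt_pos_of_unset (W H : Int) (d : List (List Int)) (p : Int × Int)
    (hs : Shape W H d) (hp : inb W H p) (h : get2 d p = -1) : 0 < cnt d := by
  obtain ⟨hx0, hxW, hy0, hyH⟩ := hp
  have hy : p.2.toNat < d.length := by rw [hs.1]; omega
  have hx' : p.1.toNat < d[p.2.toNat].length := by rw [hs.2 _ hy]; omega
  have holdE : d[p.2.toNat][p.1.toNat] = -1 := by
    rw [get2_eq_getElem W H d p ⟨hx0, hxW, hy0, hyH⟩ hy hx'] at h; exact h
  have hpos : 0 < d[p.2.toNat].count (-1) := by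
    rw [List.count_pos_iff]; exact holdE ▸ List.getElem_mem hx'
  have hmem : d[p.2.toNat].count (-1) ∈ d.map (fun r => r.count (-1)) := by
    exact List.mem_map.mpr ⟨d[p.2.toNat], List.getElem_mem hy, rfl⟩
  have := List.le_sum_of_mem hmem
  unfold cnt; omega

lemma cnt_le (W H : Int) (d : List (List Int)) (hs : Shape W H d) :
    cnt d ≤ H.toNat * W.toNat := by
  unfold cnt
  have : ∀ x ∈ d.map (fun r => r.count (-1)), x ≤ W.toNat := by
    intro x hx
    obtain ⟨r, hr, rfl⟩ := List.mem_map.mp hx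
    obtain ⟨i, hi, rfl⟩ := List.mem_iff_getElem.mp hr
    exact le_trans (List.count_le_length) (le_of_eq (hs.2 _ hi))
  calc (d.map (fun r => r.count (-1))).sum ≤ (d.map (fun r => r.count (-1))).length • W.toNat :=
        List.sum_le_card_nsmul _ _ this
    _ = H.toNat * W.toNat := by simp [hs.1, smul_eq_mul]

lemma mem_oceansOf (g : List (List String)) (W H : Int) (p : Int × Int) :
    p ∈ oceansOf g W H ↔ inb W H p ∧ strAt g p.2 p.1 = "ocean" := by
  unfold oceansOf inb
  simp only [List.mem_flatMap, List.mem_filterMap, PySem.List.mem_pyRange_one]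
  constructor
  · rintro ⟨y, ⟨hy0, hyH⟩, x, ⟨hx0, hxW⟩, hx⟩
    split at hx
    · next h =>
      cases hx
      exact ⟨⟨hx0, hxW, hy0, hyH⟩, by simpa using h⟩
    · cases hx
  · rintro ⟨⟨hx0, hxW, hy0, hyH⟩, h⟩
    exact ⟨p.2, ⟨hy0, hyH⟩, p.1, ⟨hx0, hxW⟩, by simp [h]⟩

lemma length_oceansOf (g : List (List String)) (W H : Int) :
    (oceansOf g W H).length ≤ H.toNat * W.toNat := by
  unfold oceansOf
  rw [List.length_flatMap]
  have hb : ∀ x ∈ (List.map (fun y => ((PySem.List.pyRange 0 W 1).filterMap (fun x =>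
      if strAt g y x == "ocean" then some (x, y) else none)).length) (PySem.List.pyRange 0 H 1)),
      x ≤ W.toNat := by
    intro x hx
    obtain ⟨y, _, rfl⟩ := List.mem_map.mp hx
    calc _ ≤ (PySem.List.pyRange 0 W 1).length := List.length_filterMap_le _ _
      _ = W.toNat := by rw [PySem.List.length_pyRange_one]; norm_num
  calc _ ≤ _ • W.toNat := List.sum_le_card_nsmul _ _ hb
    _ ≤ H.toNat * W.toNat := by
        simp only [List.length_map, PySem.List.length_pyRange_one, Int.sub_zero, smul_eq_mul,
          le_refl]

lemma pymin_mem (l : List Int) (d : Int) (h : l ≠ []) : pymin l d ∈ l := by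
  cases l with
  | nil => simp at h
  | cons a t =>
    unfold pymin
    rw [PySem.List.min?_id_cons, Option.getD_some]
    rcases PySem.List.foldl_min_mem t a with h | h
    · rw [h]; exact List.mem_cons_self
    · exact List.mem_cons_of_mem _ h

lemma pymin_le (l : List Int) (d : Int) (x : Int) (hx : x ∈ l) : pymin l d ≤ x := by
  cases l with
  | nil => simp at hx
  | cons a t =>
    unfold pymin
    rw [PySem.List.min?_id_cons, Option.getD_some]
    rcases List.mem_cons.mp hx with rfl | hx
    · exact (PySem.List.foldl_min_le t x).1
    · exact (PySem.List.foldl_min_le t a).2 _ hx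

lemma Dv_le (g : List (List String)) (W H : Int) (p o : Int × Int) (ho : o ∈ oceansOf g W H) :
    Dv g W H p ≤ |p.1 - o.1| + |p.2 - o.2| :=
  pymin_le _ _ _ (List.mem_map.mpr ⟨o, ho, rfl⟩)

lemma Dv_exists (g : List (List String)) (W H : Int) (p : Int × Int)
    (hO : oceansOf g W H ≠ []) :
    ∃ o ∈ oceansOf g W H, Dv g W H p = |p.1 - o.1| + |p.2 - o.2| := by
  have := pymin_mem ((oceansOf g W H).map (fun o => |p.1 - o.1| + |p.2 - o.2|)) (-1)
    (by simpa using hO)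
  obtain ⟨o, ho, heq⟩ := List.mem_map.mp this
  exact ⟨o, ho, heq.symm⟩

lemma Dv_nonneg (g : List (List String)) (W H : Int) (p : Int × Int)
    (hO : oceansOf g W H ≠ []) : 0 ≤ Dv g W H p := by
  obtain ⟨o, _, heq⟩ := Dv_exists g W H p hO
  rw [heq]; positivity

lemma Dv_empty (g : List (List String)) (W H : Int) (p : Int × Int)
    (hO : oceansOf g W H = []) : Dv g W H p = -1 := by
  unfold Dv
  rw [hO]; rfl

lemma Dv_ocean (g : List (List String)) (W H : Int) (p : Int × Int)
    (hp : p ∈ oceansOf g W H) : Dv g W H p = 0 := by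
  have h1 := Dv_le g W H p p hp
  have h2 := Dv_nonneg g W H p (fun h => by simp [h] at hp)
  simp at h1
  omega

lemma Dv_zero_mem (g : List (List String)) (W H : Int) (p : Int × Int)
    (hO : oceansOf g W H ≠ []) (h : Dv g W H p = 0) : p ∈ oceansOf g W H := by
  obtain ⟨o, ho, heq⟩ := Dv_exists g W H p hO
  rw [h] at heq
  have h1 : p.1 = o.1 ∧ p.2 = o.2 := by
    rw [Int.abs_eq_natAbs, Int.abs_eq_natAbs] at heq
    omega
  have : p = o := Prod.ext h1.1 h1.2
  rwa [this]

lemma Dv_lipschitz (g : List (List String)) (W H : Int) (p : Int × Int) (d : Int × Int)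
    (hO : oceansOf g W H ≠ []) (hd : d ∈ dirsA) :
    Dv g W H (padd p d) ≤ Dv g W H p + 1 := by
  obtain ⟨o, ho, heq⟩ := Dv_exists g W H p hO
  have h1 := Dv_le g W H (padd p d) o ho
  rw [heq]
  unfold padd at h1 ⊢
  fin_cases hd <;> simp at h1 ⊢ <;>
    (rw [Int.abs_eq_natAbs, Int.abs_eq_natAbs] at * <;> omega)

lemma Dv_step (g : List (List String)) (W H : Int) (p : Int × Int)
    (hO : oceansOf g W H ≠ []) (hp : inb W H p) (h1 : 1 ≤ Dv g W H p) :
    ∃ d ∈ dirsA, inb W H (padd p d) ∧ Dv g W H (padd p d) ≤ Dv g W H p - 1 := by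
  obtain ⟨o, ho, heq⟩ := Dv_exists g W H p hO
  have hoin : inb W H o := ((mem_oceansOf g W H o).mp ho).1
  obtain ⟨hx0, hxW, hy0, hyH⟩ := hp
  obtain ⟨hx0', hxW', hy0', hyH'⟩ := hoin
  rcases lt_trichotomy p.1 o.1 with hlt | heq1 | hgt
  · refine ⟨(1, 0), by simp [dirsA], ⟨by dsimp [padd]; omega, by dsimp [padd]; omega,
      by dsimp [padd]; omega, by dsimp [padd]; omega⟩, ?_⟩
    have hle := Dv_le g W H (padd p (1, 0)) o ho
    rw [heq]
    refine le_trans hle ?_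
    unfold padd; dsimp
    simp only [Int.abs_eq_natAbs]; omega
  · rcases lt_trichotomy p.2 o.2 with hlt2 | heq2 | hgt2
    · refine ⟨(0, 1), by simp [dirsA], ⟨by dsimp [padd]; omega, by dsimp [padd]; omega,
        by dsimp [padd]; omega, by dsimp [padd]; omega⟩, ?_⟩
      have hle := Dv_le g W H (padd p (0, 1)) o ho
      rw [heq]
      refine le_trans hle ?_
      unfold padd; dsimp
      rw [Int.abs_eq_natAbs, Int.abs_eq_natAbs, Int.abs_eq_natAbs,
        Int.abs_eq_natAbs]
      omega
    · exfalso
      rw [heq, Int.abs_eq_natAbs, Int.abs_eq_natAbs] at h1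
      omega
    · refine ⟨(0, -1), by simp [dirsA], ⟨by dsimp [padd]; omega, by dsimp [padd]; omega,
        by dsimp [padd]; omega, by dsimp [padd]; omega⟩, ?_⟩
      have hle := Dv_le g W H (padd p (0, -1)) o ho
      rw [heq]
      refine le_trans hle ?_
      unfold padd; dsimp
      rw [Int.abs_eq_natAbs, Int.abs_eq_natAbs, Int.abs_eq_natAbs,
        Int.abs_eq_natAbs]
      omega
  · refine ⟨(-1, 0), by simp [dirsA], ⟨by dsimp [padd]; omega, by dsimp [padd]; omega,
      by dsimp [padd]; omega, by dsimp [padd]; omega⟩, ?_⟩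
    have hle := Dv_le g W H (padd p (-1, 0)) o ho
    rw [heq]
    refine le_trans hle ?_
    unfold padd; dsimp
    rw [Int.abs_eq_natAbs, Int.abs_eq_natAbs, Int.abs_eq_natAbs,
      Int.abs_eq_natAbs]
    omega

lemma dirs_inv (d : Int × Int) (hd : d ∈ dirsA) :
    (-d.1, -d.2) ∈ dirsA ∧ ∀ p : Int × Int, padd (padd p d) (-d.1, -d.2) = p := by
  fin_cases hd <;> exact ⟨by simp [dirsA], fun p => by simp [padd]⟩

structure BI (g : List (List String)) (W H : Int)
    (dist : List (List Int)) (q : List (Int × Int)) : Prop where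
  sh : Shape W H dist
  vals : ∀ p, inb W H p → get2 dist p = -1 ∨ get2 dist p = Dv g W H p
  oceanSet : ∀ p ∈ oceansOf g W H, get2 dist p ≠ -1
  qmem : ∀ p ∈ q, inb W H p ∧ get2 dist p ≠ -1
  sorted : q.Pairwise (fun a b => Dv g W H a ≤ Dv g W H b)
  band : ∀ a ∈ q, ∀ b ∈ q, Dv g W H b ≤ Dv g W H a + 1
  closed : ∀ p, inb W H p → get2 dist p ≠ -1 → p ∉ q →
    ∀ d ∈ dirsA, inb W H (padd p d) → get2 dist (padd p d) ≠ -1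

lemma exists_front (g : List (List String)) (W H : Int) (dist : List (List Int))
    (q : List (Int × Int)) (hI : BI g W H dist q) (hO : oceansOf g W H ≠ [])
    (p : Int × Int) (hp : inb W H p) (hu : get2 dist p = -1) :
    ∃ r ∈ q, Dv g W H r < Dv g W H p := by
  suffices h : ∀ k (p : Int × Int), inb W H p → get2 dist p = -1 → (Dv g W H p).toNat ≤ k →
      ∃ r ∈ q, Dv g W H r < Dv g W H p from h (Dv g W H p).toNat p hp hu le_rfl
  intro k
  induction k with
  | zero =>
    intro p hp hu hk
    have h0 : Dv g W H p = 0 := by have := Dv_nonneg g W H p hO; omega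
    exact absurd hu (hI.oceanSet p (Dv_zero_mem g W H p hO h0))
  | succ k ih =>
    intro p hp hu hk
    by_cases h0 : Dv g W H p = 0
    · exact absurd hu (hI.oceanSet p (Dv_zero_mem g W H p hO h0))
    · have h1 : 1 ≤ Dv g W H p := by have := Dv_nonneg g W H p hO; omega
      obtain ⟨d, hd, hin, hle⟩ := Dv_step g W H p hO hp h1
      by_cases hn : get2 dist (padd p d) = -1
      · obtain ⟨r, hr, hlt⟩ := ih (padd p d) hin hn
          (by have := Dv_nonneg g W H (padd p d) hO; omega)
        exact ⟨r, hr, by omega⟩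
      · by_cases hq : padd p d ∈ q
        · exact ⟨padd p d, hq, by omega⟩
        · exfalso
          obtain ⟨hdinv, hps⟩ := dirs_inv d hd
          have := hI.closed (padd p d) hin hn hq (-d.1, -d.2) hdinv (by rw [hps]; exact hp)
          rw [hps] at this
          exact this hu

structure SI (g : List (List String)) (W H : Int) (c : Int × Int)
    (dist : List (List Int)) (qt : List (Int × Int))
    (s : List (List Int) × List (Int × Int)) (ds : List (Int × Int)) : Prop where
  sh : Shape W H s.1
  mono : ∀ p, inb W H p → get2 dist p ≠ -1 → get2 s.1 p = get2 dist p
  news : ∃ ns, s.2 = qt ++ ns ∧ ∀ n ∈ ns, inb W H n ∧ Dv g W H n = Dv g W H c + 1 ∧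
    get2 s.1 n = Dv g W H n ∧ get2 dist n = -1
  vals : ∀ p, inb W H p → get2 s.1 p = -1 ∨ get2 s.1 p = Dv g W H p
  newset : ∀ p, inb W H p → get2 s.1 p ≠ -1 → get2 dist p = -1 → p ∈ s.2
  done : ∀ dd ∈ dirsA, dd ∉ ds → inb W H (padd c dd) → get2 s.1 (padd c dd) ≠ -1
  meas : 5 * cnt s.1 + s.2.length ≤ 5 * cnt dist + qt.length

lemma relax_step (g : List (List String)) (W H : Int) (c : Int × Int)
    (dist : List (List Int)) (qt : List (Int × Int))
    (hO : oceansOf g W H ≠ []) (hc : inb W H c) (hcv : get2 dist c = Dv g W H c)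
    (hM : ∀ p, inb W H p → get2 dist p = -1 → Dv g W H c < Dv g W H p)
    (s : List (List Int) × List (Int × Int)) (d : Int × Int) (ds' : List (Int × Int))
    (hd : d ∈ dirsA) (hSI : SI g W H c dist qt s (d :: ds')) :
    SI g W H c dist qt (bfsRelax W H c.1 c.2 s d) ds' := by
  have hDc0 : 0 ≤ Dv g W H c := Dv_nonneg g W H c hO
  have hgetn : getC s.1 (c.2 + d.2) (c.1 + d.1) = get2 s.1 (padd c d) := rfl
  unfold bfsRelax
  simp only [hgetn]
  split_ifs with hg
  · -- relaxation fires: n := padd c d is in bounds and unset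
    obtain ⟨hnx0, hnxW, hny0, hnyH, hgn⟩ := hg
    have hinn : inb W H (padd c d) := ⟨hnx0, hnxW, hny0, hnyH⟩
    have hcset : get2 dist c ≠ -1 := by omega
    have hsc : get2 s.1 c = Dv g W H c := by rw [hSI.mono c hc hcset, hcv]
    have hdistn : get2 dist (padd c d) = -1 := by
      by_contra hne
      rw [hSI.mono _ hinn hne] at hgn
      exact hne hgn
    have hDn : Dv g W H (padd c d) = Dv g W H c + 1 := by
      have := hM _ hinn hdistn
      have := Dv_lipschitz g W H c d hO hd
      omega
    have hval : getC s.1 c.2 c.1 + 1 = Dv g W H c + 1 := by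
      show get2 s.1 c + 1 = _
      rw [hsc]
    have hsetn : setC s.1 (c.2 + d.2) (c.1 + d.1) (getC s.1 c.2 c.1 + 1) =
        set2 s.1 (padd c d) (Dv g W H c + 1) := by rw [hval]; rfl
    rw [hsetn]
    have hsh' := shape_set2 W H s.1 (padd c d) (Dv g W H c + 1) hSI.sh hinn
    have hgself : get2 (set2 s.1 (padd c d) (Dv g W H c + 1)) (padd c d) = Dv g W H c + 1 :=
      get2_set2_self W H s.1 (padd c d) _ hSI.sh hinn
    have hgne : ∀ p, inb W H p → p ≠ padd c d →
        get2 (set2 s.1 (padd c d) (Dv g W H c + 1)) p = get2 s.1 p := by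
      intro p hp hne
      exact get2_set2_ne W H s.1 (padd c d) p _ hSI.sh hinn hp (fun h => hne h.symm)
    refine ⟨hsh', ?_, ?_, ?_, ?_, ?_, ?_⟩
    · intro p hp hset
      have hne : p ≠ padd c d := fun h => by rw [h] at hset; exact hset hdistn
      rw [hgne p hp hne]
      exact hSI.mono p hp hset
    · obtain ⟨ns, hns, hprop⟩ := hSI.news
      refine ⟨ns ++ [padd c d], by simp [hns, padd], ?_⟩
      intro m hm
      rcases List.mem_append.mp hm with hm | hm
      · obtain ⟨h1, h2, h3, h4⟩ := hprop m hm
        have hmne : m ≠ padd c d := by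
          intro h; rw [h] at h3; omega
        exact ⟨h1, h2, by rw [hgne m h1 hmne]; exact h3, h4⟩
      · rw [List.mem_singleton.mp hm]
        exact ⟨hinn, hDn, by rw [hgself, hDn], hdistn⟩
    · intro p hp
      by_cases hpe : p = padd c d
      · right; rw [hpe, hgself, hDn]
      · rw [hgne p hp hpe]; exact hSI.vals p hp
    · intro p hp hset hdist
      by_cases hpe : p = padd c d
      · simp [hpe, padd]
      · rw [hgne p hp hpe] at hset
        exact List.mem_append_left _ (hSI.newset p hp hset hdist)
    · intro dd hdd hnot hin
      by_cases hde : dd = d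
      · rw [hde, hgself]; omega
      · have hm := hSI.done dd hdd (by simp [hde, hnot]) hin
        have hmne : padd c dd ≠ padd c d := by
          intro h; rw [h] at hm; exact hm hgn
        rw [hgne _ hin hmne]
        exact hm
    · have hcnt := cnt_set2 W H s.1 (padd c d) (Dv g W H c + 1) hSI.sh hinn hgn (by omega)
      have := hSI.meas
      simp only [List.length_append, List.length_singleton]
      omega
  · -- no relaxation: only the processed-direction set shrinks
    refine ⟨hSI.sh, hSI.mono, hSI.news, hSI.vals, hSI.newset, ?_, hSI.meas⟩
    intro dd hdd hnot hin
    by_cases hde : dd = d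
    · subst hde
      obtain ⟨h1, h2, h3, h4⟩ := hin
      intro hcon
      exact hg ⟨h1, h2, h3, h4, hcon⟩
    · exact hSI.done dd hdd (by simp [hde, hnot]) hin

lemma relax_fold (g : List (List String)) (W H : Int) (c : Int × Int)
    (dist : List (List Int)) (qt : List (Int × Int))
    (hO : oceansOf g W H ≠ []) (hc : inb W H c) (hcv : get2 dist c = Dv g W H c)
    (hM : ∀ p, inb W H p → get2 dist p = -1 → Dv g W H c < Dv g W H p) :
    ∀ ds s, (∀ d ∈ ds, d ∈ dirsA) → SI g W H c dist qt s ds →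
      SI g W H c dist qt (ds.foldl (bfsRelax W H c.1 c.2) s) [] := by
  intro ds
  induction ds with
  | nil => intro s _ h; exact h
  | cons d ds ih =>
    intro s hds h
    rw [List.foldl_cons]
    exact ih _ (fun e he => hds e (List.mem_cons_of_mem _ he))
      (relax_step g W H c dist qt hO hc hcv hM s d ds (hds d List.mem_cons_self) h)

lemma pop_step (g : List (List String)) (W H : Int) (dist : List (List Int))
    (c : Int × Int) (qt : List (Int × Int)) (hI : BI g W H dist (c :: qt)) :
    BI g W H (dirsA.foldl (bfsRelax W H c.1 c.2) (dist, qt)).1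
      (dirsA.foldl (bfsRelax W H c.1 c.2) (dist, qt)).2 ∧
    5 * cnt (dirsA.foldl (bfsRelax W H c.1 c.2) (dist, qt)).1 +
      (dirsA.foldl (bfsRelax W H c.1 c.2) (dist, qt)).2.length ≤ 5 * cnt dist + qt.length := by
  obtain ⟨hcin, hcset⟩ := hI.qmem c List.mem_cons_self
  have hcv : get2 dist c = Dv g W H c := by
    rcases hI.vals c hcin with h | h
    · exact absurd h hcset
    · exact h
  have hO : oceansOf g W H ≠ [] := by
    intro h
    rw [Dv_empty g W H c h] at hcv
    exact hcset hcv
  have hsorted := List.pairwise_cons.mp hI.sorted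
  have hqt_lo : ∀ a ∈ qt, Dv g W H c ≤ Dv g W H a := hsorted.1
  have hqt_hi : ∀ a ∈ qt, Dv g W H a ≤ Dv g W H c + 1 := fun a ha =>
    hI.band c List.mem_cons_self a (List.mem_cons_of_mem _ ha)
  have hM : ∀ p, inb W H p → get2 dist p = -1 → Dv g W H c < Dv g W H p := by
    intro p hp hu
    obtain ⟨r, hr, hlt⟩ := exists_front g W H dist (c :: qt) hI hO p hp hu
    rcases List.mem_cons.mp hr with rfl | hr
    · exact hlt
    · exact lt_of_le_of_lt (hqt_lo r hr) hlt
  have hSI0 : SI g W H c dist qt (dist, qt) dirsA := by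
    refine ⟨hI.sh, fun p _ _ => rfl, ⟨[], by simp, by simp⟩, hI.vals,
      fun p _ hset hunset => absurd hunset hset, fun dd hdd hnot _ => absurd hdd hnot,
      le_refl _⟩
  have hSI := relax_fold g W H c dist qt hO hcin hcv hM dirsA (dist, qt)
    (fun d hd => hd) hSI0
  obtain ⟨ns, hns, hnsp⟩ := hSI.news
  set s' := dirsA.foldl (bfsRelax W H c.1 c.2) (dist, qt) with hs'
  refine ⟨⟨hSI.sh, hSI.vals, ?_, ?_, ?_, ?_, ?_⟩, hSI.meas⟩
  · -- oceanSet
    intro p hp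
    have hin : inb W H p := ((mem_oceansOf g W H p).mp hp).1
    rw [hSI.mono p hin (hI.oceanSet p hp)]
    exact hI.oceanSet p hp
  · -- qmem
    intro p hp
    rw [hns] at hp
    rcases List.mem_append.mp hp with hp | hp
    · obtain ⟨h1, h2⟩ := hI.qmem p (List.mem_cons_of_mem _ hp)
      exact ⟨h1, by rw [hSI.mono p h1 h2]; exact h2⟩
    · obtain ⟨h1, h2, h3, _⟩ := hnsp p hp
      refine ⟨h1, by rw [h3, h2]; have := Dv_nonneg g W H c hO; omega⟩
  · -- sorted
    rw [hns, List.pairwise_append]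
    refine ⟨hsorted.2, ?_, ?_⟩
    · exact List.pairwise_of_forall_mem_list (fun a ha b hb => by
        rw [(hnsp a ha).2.1, (hnsp b hb).2.1])
    · intro a ha b hb
      rw [(hnsp b hb).2.1]
      exact le_trans (hqt_hi a ha) (by omega)
  · -- band
    intro a ha b hb
    rw [hns] at ha hb
    have hla : Dv g W H c ≤ Dv g W H a := by
      rcases List.mem_append.mp ha with h | h
      · exact hqt_lo a h
      · rw [(hnsp a h).2.1]; omega
    have hlb : Dv g W H b ≤ Dv g W H c + 1 := by
      rcases List.mem_append.mp hb with h | h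
      · exact hqt_hi b h
      · rw [(hnsp b h).2.1]
    omega
  · -- closed
    intro p hp hset hnotq d hd hind
    by_cases hpc : p = c
    · subst hpc
      exact hSI.done d hd (by simp) hind
    · by_cases hpd : get2 dist p = -1
      · exact absurd (hSI.newset p hp hset hpd) hnotq
      · have hclosed := hI.closed p hp hpd (by
          intro hmem
          rcases List.mem_cons.mp hmem with h | h
          · exact hpc h
          · exact hnotq (by rw [hns]; exact List.mem_append_left _ h)) d hd hind
        rw [hSI.mono _ hind hclosed]
        exact hclosed

lemma bfs_final (g : List (List String)) (W H : Int) :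
    ∀ (fuel : Nat) (dist : List (List Int)) (q : List (Int × Int)), BI g W H dist q →
      5 * cnt dist + q.length ≤ fuel →
      Shape W H (bfsLoop W H fuel (dist, q)) ∧
      ∀ p, inb W H p → get2 (bfsLoop W H fuel (dist, q)) p = Dv g W H p := by
  intro fuel
  induction fuel with
  | zero =>
    intro dist q hI hm
    have hc0 : cnt dist = 0 := by omega
    simp only [bfsLoop]
    refine ⟨hI.sh, ?_⟩
    intro p hp
    rcases hI.vals p hp with h | h
    · exact absurd hc0 (Nat.pos_iff_ne_zero.mp (cnt_pos_of_unset W H dist p hI.sh hp h))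
    · exact h
  | succ fuel ih =>
    intro dist q hI hm
    rcases q with _ | ⟨⟨x, y⟩, qt⟩
    · simp only [bfsLoop]
      refine ⟨hI.sh, ?_⟩
      intro p hp
      rcases hI.vals p hp with h | h
      · by_cases hO : oceansOf g W H = []
        · rw [h, Dv_empty g W H p hO]
        · obtain ⟨r, hr, _⟩ := exists_front g W H dist [] hI hO p hp h
          exact absurd hr (List.not_mem_nil)
      · exact h
    · obtain ⟨hBI, hmeas⟩ := pop_step g W H dist (x, y) qt hI
      dsimp only at hBI hmeas
      have hm' : 5 * cnt (dirsA.foldl (bfsRelax W H x y) (dist, qt)).1 +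
          (dirsA.foldl (bfsRelax W H x y) (dist, qt)).2.length ≤ fuel := by
        simp only [List.length_cons] at hm
        omega
      have := ih _ _ hBI hm'
      simp only [Prod.mk.eta] at this
      simpa only [bfsLoop] using this

lemma filter_map_eq_filterMap {α β : Type} (l : List α) (p : α → Bool) (f : α → β) :
    (l.filter p).map f = l.filterMap (fun x => if p x then some (f x) else none) := by
  induction l with
  | nil => rfl
  | cons a t ih => by_cases h : p a <;> simp [h, ih]

lemma foldl_pair_if {α β γ : Type} (l : List α) (p : α → Bool) (f : γ → α → γ) (gg : α → β)
    (s : γ × List β) :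
    l.foldl (fun s x => if p x then (f s.1 x, s.2 ++ [gg x]) else s) s =
      (l.foldl (fun d x => if p x then f d x else d) s.1, s.2 ++ (l.filter p).map gg) := by
  induction l generalizing s with
  | nil => simp
  | cons a t ih => by_cases h : p a <;> simp [h, ih]

lemma inner_char (g : List (List String)) (W H : Int) (y : Int) (hy0 : 0 ≤ y) (hyH : y < H) :
    ∀ (xs : List Int), (∀ x ∈ xs, 0 ≤ x ∧ x < W) → ∀ d, Shape W H d →
      Shape W H (xs.foldl (fun d x => if strAt g y x == "ocean" then setC d y x 0 else d) d) ∧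
      ∀ p, inb W H p →
        get2 (xs.foldl (fun d x => if strAt g y x == "ocean" then setC d y x 0 else d) d) p =
          if p.2 = y ∧ p.1 ∈ xs ∧ strAt g p.2 p.1 = "ocean" then 0 else get2 d p := by
  intro xs
  induction xs with
  | nil =>
    intro _ d hd
    refine ⟨hd, fun p hp => ?_⟩
    simp
  | cons x xs ih =>
    intro hxs d hd
    have hxin : inb W H (x, y) := by
      obtain ⟨h1, h2⟩ := hxs x List.mem_cons_self
      exact ⟨h1, h2, hy0, hyH⟩
    rw [List.foldl_cons]
    by_cases hoc : strAt g y x == "ocean"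
    · rw [if_pos hoc]
      have hoc' : strAt g y x = "ocean" := by simpa using hoc
      have hd' : Shape W H (setC d y x 0) := shape_set2 W H d (x, y) 0 hd hxin
      obtain ⟨hsh, hch⟩ := ih (fun e he => hxs e (List.mem_cons_of_mem _ he)) _ hd'
      refine ⟨hsh, fun p hp => ?_⟩
      rw [hch p hp]
      by_cases hc1 : p.2 = y ∧ p.1 ∈ xs ∧ strAt g p.2 p.1 = "ocean"
      · rw [if_pos hc1, if_pos ⟨hc1.1, List.mem_cons_of_mem _ hc1.2.1, hc1.2.2⟩]
      · rw [if_neg hc1]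
        by_cases hpe : p = (x, y)
        · have : get2 (setC d y x 0) p = 0 := by
            rw [hpe]; exact get2_set2_self W H d (x, y) 0 hd hxin
          rw [this, if_pos ⟨by rw [hpe], by rw [hpe]; exact List.mem_cons_self,
            by rw [hpe]; exact hoc'⟩]
        · have : get2 (setC d y x 0) p = get2 d p :=
            get2_set2_ne W H d (x, y) p 0 hd hxin hp (fun h => hpe h.symm)
          rw [this, if_neg]
          rintro ⟨h1, h2, h3⟩
          rcases List.mem_cons.mp h2 with h | h
          · exact hpe (Prod.ext h h1)
          · exact hc1 ⟨h1, h, h3⟩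
    · rw [if_neg hoc]
      have hoc' : ¬ strAt g y x = "ocean" := by simpa using hoc
      obtain ⟨hsh, hch⟩ := ih (fun e he => hxs e (List.mem_cons_of_mem _ he)) _ hd
      refine ⟨hsh, fun p hp => ?_⟩
      rw [hch p hp]
      by_cases hc1 : p.2 = y ∧ p.1 ∈ xs ∧ strAt g p.2 p.1 = "ocean"
      · rw [if_pos hc1, if_pos ⟨hc1.1, List.mem_cons_of_mem _ hc1.2.1, hc1.2.2⟩]
      · rw [if_neg hc1, if_neg]
        rintro ⟨h1, h2, h3⟩
        rcases List.mem_cons.mp h2 with h | h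
        · exact hoc' (by rw [← h1, ← h]; exact h3)
        · exact hc1 ⟨h1, h, h3⟩

lemma outer_char (g : List (List String)) (W H : Int) :
    ∀ (ys : List Int), (∀ y ∈ ys, 0 ≤ y ∧ y < H) → ∀ d, Shape W H d →
      Shape W H (ys.foldl (fun d y => (PySem.List.pyRange 0 W 1).foldl
        (fun d x => if strAt g y x == "ocean" then setC d y x 0 else d) d) d) ∧
      ∀ p, inb W H p →
        get2 (ys.foldl (fun d y => (PySem.List.pyRange 0 W 1).foldl
          (fun d x => if strAt g y x == "ocean" then setC d y x 0 else d) d) d) p =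
          if p.2 ∈ ys ∧ strAt g p.2 p.1 = "ocean" then 0 else get2 d p := by
  intro ys
  induction ys with
  | nil =>
    intro _ d hd
    exact ⟨hd, fun p hp => by simp⟩
  | cons y ys ih =>
    intro hys d hd
    obtain ⟨hy0, hyH⟩ := hys y List.mem_cons_self
    rw [List.foldl_cons]
    obtain ⟨hd', hch'⟩ := inner_char g W H y hy0 hyH (PySem.List.pyRange 0 W 1)
      (fun x hx => by
        obtain ⟨h1, h2⟩ := PySem.List.mem_pyRange_one.mp hx
        exact ⟨h1, h2⟩) d hd
    obtain ⟨hsh, hch⟩ := ih (fun e he => hys e (List.mem_cons_of_mem _ he)) _ hd'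
    refine ⟨hsh, fun p hp => ?_⟩
    rw [hch p hp]
    have hmem : p.1 ∈ PySem.List.pyRange 0 W 1 := by
      rw [PySem.List.mem_pyRange_one]
      exact ⟨hp.1, hp.2.1⟩
    by_cases hc1 : p.2 ∈ ys ∧ strAt g p.2 p.1 = "ocean"
    · rw [if_pos hc1, if_pos ⟨List.mem_cons_of_mem _ hc1.1, hc1.2⟩]
    · rw [if_neg hc1, hch' p hp]
      by_cases hc2 : p.2 = y ∧ strAt g p.2 p.1 = "ocean"
      · rw [if_pos ⟨hc2.1, hmem, hc2.2⟩, if_pos ⟨by rw [hc2.1]; exact List.mem_cons_self, hc2.2⟩]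
      · rw [if_neg (fun h => hc2 ⟨h.1, h.2.2⟩), if_neg]
        rintro ⟨h1, h2⟩
        rcases List.mem_cons.mp h1 with h | h
        · exact hc2 ⟨h, h2⟩
        · exact hc1 ⟨h, h2⟩

lemma dist0_shape (W H : Int) :
    Shape W H ((PySem.List.pyRange 0 H 1).map (fun _ => List.replicate W.toNat (-1))) := by
  constructor
  · rw [List.length_map, PySem.List.length_pyRange_one, Int.sub_zero]
  · intro i hi
    rw [List.getElem_map, List.length_replicate]

lemma dist0_get (W H : Int) (p : Int × Int) (hp : inb W H p) :
    get2 ((PySem.List.pyRange 0 H 1).map (fun _ => List.replicate W.toNat (-1))) p = -1 := by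
  obtain ⟨hx0, hxW, hy0, hyH⟩ := hp
  have hsh := dist0_shape W H
  have h2 : p.2.toNat < ((PySem.List.pyRange 0 H 1).map
      (fun _ => List.replicate W.toNat (-1))).length := by rw [hsh.1]; omega
  have h1 : p.1.toNat < (((PySem.List.pyRange 0 H 1).map
      (fun _ => List.replicate W.toNat (-1)))[p.2.toNat]).length := by
    rw [hsh.2 _ h2]; omega
  rw [get2_eq_getElem W H _ p ⟨hx0, hxW, hy0, hyH⟩ h2 h1]
  simp

lemma init_BI (g : List (List String)) (W H : Int)
    (dist : List (List Int)) (hsh : Shape W H dist)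
    (hch : ∀ p, inb W H p → get2 dist p = (if strAt g p.2 p.1 = "ocean" then 0 else -1)) :
    BI g W H dist (oceansOf g W H) := by
  have hget : ∀ p ∈ oceansOf g W H, get2 dist p = 0 := by
    intro p hp
    obtain ⟨hin, hoc⟩ := (mem_oceansOf g W H p).mp hp
    rw [hch p hin, if_pos hoc]
  refine ⟨hsh, ?_, ?_, ?_, ?_, ?_, ?_⟩
  · intro p hp
    rw [hch p hp]
    by_cases hoc : strAt g p.2 p.1 = "ocean"
    · right
      rw [if_pos hoc, Dv_ocean g W H p ((mem_oceansOf g W H p).mpr ⟨hp, hoc⟩)]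
    · left; rw [if_neg hoc]
  · intro p hp
    rw [hget p hp]; omega
  · intro p hp
    exact ⟨((mem_oceansOf g W H p).mp hp).1, by rw [hget p hp]; omega⟩
  · exact List.pairwise_of_forall_mem_list (fun a ha b hb => by
      rw [Dv_ocean g W H a ha, Dv_ocean g W H b hb])
  · intro a ha b hb
    rw [Dv_ocean g W H a ha, Dv_ocean g W H b hb]; omega
  · intro p hp hset hnq d hd hin
    rw [hch p hp] at hset
    by_cases hoc : strAt g p.2 p.1 = "ocean"
    · exact absurd ((mem_oceansOf g W H p).mpr ⟨hp, hoc⟩) hnq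
    · rw [if_neg hoc] at hset; exact absurd rfl hset

lemma main_eq (g : List (List String)) (W H : Int) (hW : 0 ≤ W) (hH : 0 ≤ H) :
    bfsLoop W H (6 * (H.toNat * W.toNat))
      ((PySem.List.pyRange 0 H 1).foldl (fun s y =>
        (PySem.List.pyRange 0 W 1).foldl (fun s x =>
          if strAt g y x == "ocean" then (setC s.1 y x 0, s.2 ++ [(x, y)]) else s) s)
        ((PySem.List.pyRange 0 H 1).map (fun _ => List.replicate W.toNat (-1)),
          ([] : List (Int × Int)))) =
    (PySem.List.pyRange 0 H 1).map (fun y =>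
      (PySem.List.pyRange 0 W 1).map (fun x =>
        pymin ((oceansOf g W H).map (fun o => |x - o.1| + |y - o.2|)) (-1))) := by
  -- split the initialisation fold into its two components
  have hsplit : ∀ (s : List (List Int) × List (Int × Int)) (y : Int),
      (PySem.List.pyRange 0 W 1).foldl (fun s x =>
        if strAt g y x == "ocean" then (setC s.1 y x 0, s.2 ++ [(x, y)]) else s) s =
      ((PySem.List.pyRange 0 W 1).foldl (fun d x =>
          if strAt g y x == "ocean" then setC d y x 0 else d) s.1,
        s.2 ++ ((PySem.List.pyRange 0 W 1).filterMap (fun x =>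
          if strAt g y x == "ocean" then some (x, y) else none))) := by
    intro s y
    rw [foldl_pair_if (PySem.List.pyRange 0 W 1) (fun x => strAt g y x == "ocean")
      (fun d x => setC d y x 0) (fun x => (x, y)) s,
      filter_map_eq_filterMap]
  have hinit : ∀ (ys : List Int) (s : List (List Int) × List (Int × Int)),
      ys.foldl (fun s y =>
        (PySem.List.pyRange 0 W 1).foldl (fun s x =>
          if strAt g y x == "ocean" then (setC s.1 y x 0, s.2 ++ [(x, y)]) else s) s) s =
      (ys.foldl (fun d y => (PySem.List.pyRange 0 W 1).foldl (fun d x =>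
          if strAt g y x == "ocean" then setC d y x 0 else d) d) s.1,
        s.2 ++ ys.flatMap (fun y => (PySem.List.pyRange 0 W 1).filterMap (fun x =>
          if strAt g y x == "ocean" then some (x, y) else none))) := by
    intro ys
    induction ys with
    | nil => intro s; simp
    | cons y ys ih =>
      intro s
      rw [List.foldl_cons, hsplit s y, ih, List.foldl_cons, List.flatMap_cons,
        List.append_assoc]
  rw [hinit]
  rw [List.nil_append]
  show bfsLoop W H _ (_, oceansOf g W H) = _
  have hdist := outer_char g W H (PySem.List.pyRange 0 H 1)
    (fun y hy => PySem.List.mem_pyRange_one.mp hy)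
    ((PySem.List.pyRange 0 H 1).map (fun _ => List.replicate W.toNat (-1))) (dist0_shape W H)
  obtain ⟨hsh, hch⟩ := hdist
  have hch' : ∀ p, inb W H p →
      get2 ((PySem.List.pyRange 0 H 1).foldl (fun d y => (PySem.List.pyRange 0 W 1).foldl
        (fun d x => if strAt g y x == "ocean" then setC d y x 0 else d) d)
        ((PySem.List.pyRange 0 H 1).map (fun _ => List.replicate W.toNat (-1)))) p =
      (if strAt g p.2 p.1 = "ocean" then 0 else -1) := by
    intro p hp
    rw [hch p hp, dist0_get W H p hp]
    have hmem : p.2 ∈ PySem.List.pyRange 0 H 1 :=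
      PySem.List.mem_pyRange_one.mpr ⟨hp.2.2.1, hp.2.2.2⟩
    by_cases hoc : strAt g p.2 p.1 = "ocean"
    · rw [if_pos ⟨hmem, hoc⟩, if_pos hoc]
    · rw [if_neg (fun h => hoc h.2), if_neg hoc]
  have hBI := init_BI g W H _ hsh hch'
  have hfuel : 5 * cnt ((PySem.List.pyRange 0 H 1).foldl (fun d y =>
      (PySem.List.pyRange 0 W 1).foldl
        (fun d x => if strAt g y x == "ocean" then setC d y x 0 else d) d)
      ((PySem.List.pyRange 0 H 1).map (fun _ => List.replicate W.toNat (-1)))) +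
      (oceansOf g W H).length ≤ 6 * (H.toNat * W.toNat) := by
    have h1 := cnt_le W H _ hsh
    have h2 := length_oceansOf g W H
    omega
  obtain ⟨hshf, hvf⟩ := bfs_final g W H (6 * (H.toNat * W.toNat)) _ _ hBI hfuel
  -- extensionality
  apply List.ext_getElem
  · rw [hshf.1, List.length_map, PySem.List.length_pyRange_one, Int.sub_zero]
  · intro i hi1 hi2
    apply List.ext_getElem
    · rw [hshf.2 _ hi1, List.getElem_map, List.length_map, PySem.List.length_pyRange_one,
        Int.sub_zero]
    · intro j hj1 hj2
      have hiH : i < H.toNat := by rw [hshf.1] at hi1; exact hi1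
      have hjW : j < W.toNat := by rw [hshf.2 _ hi1] at hj1; exact hj1
      have hp : inb W H ((j : Int), (i : Int)) := by
        refine ⟨by positivity, by omega, by positivity, by omega⟩
      have hval := hvf ((j : Int), (i : Int)) hp
      have hR1 : ((i : Int)).toNat < (bfsLoop W H (6 * (H.toNat * W.toNat))
          ((PySem.List.pyRange 0 H 1).foldl (fun d y => (PySem.List.pyRange 0 W 1).foldl
            (fun d x => if strAt g y x == "ocean" then setC d y x 0 else d) d)
            ((PySem.List.pyRange 0 H 1).map (fun _ => List.replicate W.toNat (-1))),
            oceansOf g W H)).length := by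
        simp only [Int.toNat_natCast]
        rw [hshf.1]; exact hiH
      rw [get2_eq_getElem W H _ _ hp hR1 (by
        simp only [Int.toNat_natCast]
        rw [hshf.2]; exact hjW)] at hval
      simp only [Int.toNat_natCast] at hval
      rw [hval]
      simp only [List.getElem_map, PySem.List.getElem_pyRange_one, zero_add]
      rfl

-- ===== VERDICT (by name: the statement is the Claim_ definition above) =====
theorem compute_dist_to_ocean_spec : Claim_equal_compute_dist_to_ocean := by
  intro grid _ _
  unfold Spec_compute_dist_to_ocean
  simp only [compute_dist_to_ocean, compute_dist_to_ocean_alt]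
  apply main_eq
  · split
    · exact Int.natCast_nonneg _
    · exact le_refl 0
  · exact Int.natCast_nonneg _
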